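-- pv_equiv track=rewrite | github.com/84rt/AI-Risk-Observatory | pipeline/src/markdown_chunker.py | _find_sentence_end
-- ===== SOURCE A (Python) =====
-- def _find_sentence_end(text: str, target: int) -> int:
--     if target >= len(text):
--         return len(text)
--
--     candidates = []
--     blank_break = text.find("\n\n", target)
--     if blank_break >= 0:
--         candidates.append(blank_break)
--     for marker in (". ", "! ", "? ", ".\n", "!\n", "?\n"):
--         idx = text.find(marker, target)
--         if idx >= 0:
--             candidates.append(idx + 1)
--     if not candidates:
--         return len(text)
--     return min(candidates) + 1
-- ===== SOURCE B (Python) =====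
-- def _find_sentence_end(text: str, target: int) -> int:
--     n = len(text)
--     for i in range(target, n):
--         pair = text[i:i+2]
--         if pair == "\n\n":
--             return i + 1
--         if pair in (". ", "! ", "? ", ".\n", "!\n", "?\n"):
--             return i + 2
--     return n
-- ===== Notes on version B (the rewrite author's own statement) =====
-- stated objective: alternative
-- what changed: Replaces A's seven separate find-scans plus a min over collected candidates with a single forward scan that returns at the first matching position (correct because candidate offsets are monotone in position); Pre_ restricts target to 0 <= target, since on negative targets A's value comes from str.find's negative-start wraparound, an accident of the implementation.
-- outside the precondition, e.g. on _find_sentence_end('a. b', -2): A returns 4, B returns 3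
import Mathlib
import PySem

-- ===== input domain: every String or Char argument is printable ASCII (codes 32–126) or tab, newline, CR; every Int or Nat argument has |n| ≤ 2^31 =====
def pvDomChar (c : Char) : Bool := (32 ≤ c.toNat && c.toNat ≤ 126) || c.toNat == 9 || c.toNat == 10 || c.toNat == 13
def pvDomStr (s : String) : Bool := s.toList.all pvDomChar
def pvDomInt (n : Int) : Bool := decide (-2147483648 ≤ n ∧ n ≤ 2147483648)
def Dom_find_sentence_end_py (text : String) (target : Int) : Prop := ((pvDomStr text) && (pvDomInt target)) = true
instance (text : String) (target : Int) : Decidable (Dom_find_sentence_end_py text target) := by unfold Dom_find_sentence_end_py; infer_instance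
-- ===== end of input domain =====

-- B replaces A's seven find-scans + min with a single forward scan returning at the first
-- matching position (alternative algorithm; same asymptotic cost, no speed claim).

-- ===== PORT A =====
-- the tuple of sentence markers A iterates over
def pvMarkers : List String := [". ", "! ", "? ", ".\n", "!\n", "?\n"]

def find_sentence_end_py (text : String) (target : Int) : Int :=
  if target ≥ PySem.Str.len text then PySem.Str.len text
  else
    let blank_break := PySem.Str.findFrom text "\n\n" target
    let candidates : List Int := if blank_break ≥ 0 then [blank_break] else []
    let candidates := pvMarkers.foldl (fun acc m =>
      let idx := PySem.Str.findFrom text m target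
      if idx ≥ 0 then acc ++ [idx + 1] else acc) candidates
    if candidates = [] then PySem.Str.len text
    else match PySem.List.min? candidates (fun x => x) with
      | some m => m + 1
      | none => PySem.Str.len text  -- unreachable: candidates ≠ []

-- ===== PORT B =====
-- `pair in (". ", "! ", "? ", ".\n", "!\n", "?\n")`
def pvIsMarkerPair (c1 c2 : Char) : Bool :=
  (c1 = '.' && c2 = ' ') || (c1 = '!' && c2 = ' ') || (c1 = '?' && c2 = ' ') ||
  (c1 = '.' && c2 = '\n') || (c1 = '!' && c2 = '\n') || (c1 = '?' && c2 = '\n')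

-- the `for i in range(target, n)` loop over text[i:i+2], transcribed on the suffix starting
-- at i; a suffix shorter than 2 chars cannot match any of the two-char patterns
def pvScan : List Char → Nat → Nat → Int
  | [], _, n => (n : Int)
  | [_], _, n => (n : Int)
  | c1 :: c2 :: rest, i, n =>
    if c1 = '\n' && c2 = '\n' then ((i : Int) + 1)
    else if pvIsMarkerPair c1 c2 then ((i : Int) + 2)
    else pvScan (c2 :: rest) (i + 1) n

def find_sentence_end_py_alt (text : String) (target : Int) : Int :=
  let cs := text.toList
  let n := cs.length
  pvScan (cs.drop target.toNat) target.toNat n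

-- ===== PRECONDITION & SPEC =====
-- Pre_ restricts target to the natural domain of a text position (0 ≤ target); on negative
-- targets A still returns, but its value comes from str.find's negative-start wraparound,
-- an accident of A's implementation that no caller relies on.
def Pre_find_sentence_end_py (text : String) (target : Int) : Prop := 0 ≤ target
instance (text : String) (target : Int) : Decidable (Pre_find_sentence_end_py text target) := by unfold Pre_find_sentence_end_py; infer_instance
def pvWitness_find_sentence_end_py : String × Int := ("a. b", 1)

def Spec_find_sentence_end_py (text : String) (target : Int) (out : Int) : Prop := out = find_sentence_end_py_alt text target
instance (text : String) (target : Int) (out : Int) : Decidable (Spec_find_sentence_end_py text target out) := by unfold Spec_find_sentence_end_py; infer_instance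

-- ===== CLAIM (what is proved, stated in full; the proofs are below) =====
def Claim_equal_find_sentence_end_py : Prop := ∀ (text : String) (target : Int), Dom_find_sentence_end_py text target → Pre_find_sentence_end_py text target → Spec_find_sentence_end_py text target (find_sentence_end_py text target)

-- ===== LEMMAS AND PROOFS =====

-- a "hit" at offset j of the suffix: one of the seven patterns starts there
def pvBlankAt (suf : List Char) (j : Nat) : Prop := ['\n', '\n'] <+: suf.drop j
def pvMarkAt (suf : List Char) (j : Nat) : Prop := ∃ m ∈ pvMarkers, m.toList <+: suf.drop j
def pvHit (suf : List Char) (j : Nat) : Prop := pvBlankAt suf j ∨ pvMarkAt suf j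

lemma pvFind_eq_of_first (suf sub : List Char) (j : Nat)
    (hp : sub <+: suf.drop j) (hn : ∀ i < j, ¬ sub <+: suf.drop i) :
    PySem.Chars.find suf sub = (j : Int) := by
  have hinf : sub <:+: suf := hp.isInfix.trans (List.drop_suffix j suf).isInfix
  have h0 : 0 ≤ PySem.Chars.find suf sub := (PySem.Chars.find_nonneg_iff suf sub).mpr hinf
  obtain ⟨hpf, hmin⟩ := PySem.Chars.find_spec h0
  have hj : (PySem.Chars.find suf sub).toNat = j := by
    rcases lt_trichotomy (PySem.Chars.find suf sub).toNat j with h | h | h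
    · exact absurd hpf (hn _ h)
    · exact h
    · exact absurd hp (hmin j h)
  omega

lemma pvFind_ge (suf sub : List Char) (j : Nat)
    (h0 : 0 ≤ PySem.Chars.find suf sub) (hn : ∀ i < j, ¬ sub <+: suf.drop i) :
    (j : Int) ≤ PySem.Chars.find suf sub := by
  obtain ⟨hpf, _⟩ := PySem.Chars.find_spec h0
  by_contra h
  exact hn _ (by omega) hpf

lemma pvMin?_eq (xs : List Int) (m : Int) (hm : m ∈ xs) (hle : ∀ x ∈ xs, m ≤ x) :
    PySem.List.min? xs (fun x => x) = some m := by
  cases h : PySem.List.min? xs (fun x => x) with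
  | none => rw [PySem.List.min?_eq_none_iff] at h; subst h; simp at hm
  | some m' =>
    have h1 : m' ∈ xs := PySem.List.min?_mem h
    have h2 : m' ≤ m := PySem.List.min?_isMin h m hm
    have h3 : m ≤ m' := hle m' h1
    rw [le_antisymm h2 h3]

-- the foldl of A's marker loop, as an append of a filtered map
lemma pvFoldl_opt (g : String → Int) (l : List String) (acc : List Int) :
    l.foldl (fun a m => if g m ≥ 0 then a ++ [g m + 1] else a) acc
      = acc ++ (l.filter (fun m => decide (0 ≤ g m))).map (fun m => g m + 1) := by
  induction l generalizing acc with
  | nil => simp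
  | cons x xs ih =>
    simp only [List.foldl_cons, List.filter_cons]
    by_cases h : 0 ≤ g x
    · rw [ih]; simp [h, ge_iff_le]
    · rw [ih]; simp [h, ge_iff_le]

-- no marker pair at the head when no marker is a prefix
lemma pvNoPair {c1 c2 : Char} {rest : List Char}
    (hm : ∀ m ∈ pvMarkers, ¬ m.toList <+: c1 :: c2 :: rest) :
    ¬ pvIsMarkerPair c1 c2 = true := by
  unfold pvIsMarkerPair
  simp only [Bool.or_eq_true, Bool.and_eq_true, decide_eq_true_eq]
  rintro (((((⟨rfl, rfl⟩ | ⟨rfl, rfl⟩) | ⟨rfl, rfl⟩) | ⟨rfl, rfl⟩) | ⟨rfl, rfl⟩) | ⟨rfl, rfl⟩)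
  · exact hm ". " (by simp [pvMarkers]) ⟨rest, rfl⟩
  · exact hm "! " (by simp [pvMarkers]) ⟨rest, rfl⟩
  · exact hm "? " (by simp [pvMarkers]) ⟨rest, rfl⟩
  · exact hm ".\n" (by simp [pvMarkers]) ⟨rest, rfl⟩
  · exact hm "!\n" (by simp [pvMarkers]) ⟨rest, rfl⟩
  · exact hm "?\n" (by simp [pvMarkers]) ⟨rest, rfl⟩

lemma pvNoBlank {c1 c2 : Char} {rest : List Char}
    (hb : ¬ ['\n', '\n'] <+: c1 :: c2 :: rest) : ¬ (c1 = '\n' && c2 = '\n') = true := by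
  simp only [Bool.and_eq_true, decide_eq_true_eq]
  rintro ⟨rfl, rfl⟩
  exact hb ⟨rest, rfl⟩

lemma pvPrefix_pair {a b c1 c2 : Char} {rest : List Char} (h : [a, b] <+: c1 :: c2 :: rest) :
    a = c1 ∧ b = c2 := by
  rcases List.cons_prefix_cons.mp h with ⟨h1, h2⟩
  rcases List.cons_prefix_cons.mp h2 with ⟨h3, _⟩
  exact ⟨h1, h3⟩

-- B's scan when no pattern occurs anywhere in the suffix
lemma pvScan_none (suf : List Char) (s n : Nat) (h : ∀ j, ¬ pvHit suf j) :
    pvScan suf s n = (n : Int) := by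
  induction suf generalizing s with
  | nil => rfl
  | cons c1 tail ih =>
    cases tail with
    | nil => rfl
    | cons c2 rest =>
      have h0 := h 0
      simp only [pvHit, pvBlankAt, pvMarkAt, List.drop_zero] at h0
      push_neg at h0
      obtain ⟨hb, hm⟩ := h0
      rw [pvScan, if_neg (pvNoBlank hb), if_neg (pvNoPair hm)]
      exact ih (s + 1) (fun j => by
        have := h (j + 1)
        simpa [pvHit, pvBlankAt, pvMarkAt] using this)

-- B's scan when the first hit is a blank break
lemma pvScan_blank (suf : List Char) (s n : Nat) (j : Nat)
    (hb : pvBlankAt suf j) (hn : ∀ i < j, ¬ pvHit suf i) :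
    pvScan suf s n = ((s : Int) + j + 1) := by
  induction suf generalizing s j with
  | nil =>
    exfalso
    have := hb.length_le
    simp at this
  | cons c1 tail ih =>
    cases tail with
    | nil =>
      exfalso
      have h2 := hb.length_le
      simp only [List.length_drop, List.length_cons, List.length_nil] at h2
      omega
    | cons c2 rest =>
      cases j with
      | zero =>
        unfold pvBlankAt at hb
        simp only [List.drop_zero] at hb
        obtain ⟨rfl, rfl⟩ := pvPrefix_pair hb
        rw [pvScan, if_pos (by simp)]
        push_cast; ring
      | succ k =>
        have h0 := hn 0 (by omega)
        simp only [pvHit, pvBlankAt, pvMarkAt, List.drop_zero] at h0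
        push_neg at h0
        obtain ⟨hb0, hm0⟩ := h0
        rw [pvScan, if_neg (pvNoBlank hb0), if_neg (pvNoPair hm0)]
        have := ih (s + 1) k (by simpa [pvBlankAt] using hb)
          (fun i hi => by
            have := hn (i + 1) (by omega)
            simpa [pvHit, pvBlankAt, pvMarkAt] using this)
        rw [this]; push_cast; ring

-- B's scan when the first hit is a sentence marker (and not a blank break)
lemma pvScan_mark (suf : List Char) (s n : Nat) (j : Nat)
    (hm : pvMarkAt suf j) (hnb : ¬ pvBlankAt suf j) (hn : ∀ i < j, ¬ pvHit suf i) :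
    pvScan suf s n = ((s : Int) + j + 2) := by
  induction suf generalizing s j with
  | nil =>
    exfalso
    rcases hm with ⟨m, hmem, hp⟩
    have h2 : m.toList.length = 2 := by fin_cases hmem <;> decide
    have := hp.length_le
    simp [h2] at this
  | cons c1 tail ih =>
    cases tail with
    | nil =>
      exfalso
      rcases hm with ⟨m, hmem, hp⟩
      have h2 : m.toList.length = 2 := by fin_cases hmem <;> decide
      have hl := hp.length_le
      simp only [h2, List.length_drop, List.length_cons, List.length_nil] at hl
      omega
    | cons c2 rest =>
      cases j with
      | zero =>
        have hb0 : ¬ ['\n', '\n'] <+: c1 :: c2 :: rest := by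
          simpa [pvBlankAt] using hnb
        have hm' : pvIsMarkerPair c1 c2 = true := by
          obtain ⟨m, hmem, hp⟩ := hm
          simp only [List.drop_zero] at hp
          simp only [pvMarkers, List.mem_cons, List.not_mem_nil, or_false] at hmem
          rcases hmem with rfl | rfl | rfl | rfl | rfl | rfl <;>
            (obtain ⟨rfl, rfl⟩ := pvPrefix_pair hp; decide)
        rw [pvScan, if_neg (pvNoBlank hb0), if_pos hm']
        push_cast; ring
      | succ k =>
        have h0 := hn 0 (by omega)
        simp only [pvHit, pvBlankAt, pvMarkAt, List.drop_zero] at h0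
        push_neg at h0
        obtain ⟨hb0, hm0⟩ := h0
        rw [pvScan, if_neg (pvNoBlank hb0), if_neg (pvNoPair hm0)]
        have := ih (s + 1) k
          (by rcases hm with ⟨m, hmem, hp⟩; exact ⟨m, hmem, by simpa using hp⟩)
          (by simpa [pvBlankAt] using hnb)
          (fun i hi => by
            have := hn (i + 1) (by omega)
            simpa [pvHit, pvBlankAt, pvMarkAt] using this)
        rw [this]; push_cast; ring

-- ===== VERDICT (by name: the statement is the Claim_ definition above) =====
theorem find_sentence_end_py_spec : Claim_equal_find_sentence_end_py := by
  intro text target _ hpre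
  unfold Pre_find_sentence_end_py at hpre
  unfold Spec_find_sentence_end_py
  by_cases hge : target ≥ ((text.toList.length : Nat) : Int)
  · have hge' : ((text.length : Nat) : Int) ≤ target := by simpa using hge
    have hdrop : text.toList.drop target.toNat = [] := by
      apply List.drop_eq_nil_of_le
      omega
    simp [find_sentence_end_py, find_sentence_end_py_alt, PySem.Str.len_eq, hge', hdrop, pvScan]
  · have hlt : target < (text.toList.length : Int) := by omega
    set cs := text.toList with hcs
    set n := cs.length with hn
    set s := target.toNat with hsdef
    have hsn : s ≤ n := by omega
    have hst : ((s : Nat) : Int) = target := by omega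
    set suf := cs.drop s with hsuf
    have hFF : ∀ sub : List Char, PySem.Chars.findFrom cs sub target =
        (if PySem.Chars.find suf sub = -1 then -1
         else ((s : Int) + PySem.Chars.find suf sub)) := by
      intro sub
      rw [← hst]
      exact PySem.Chars.findFrom_natCast cs sub s hsn
    have hB : find_sentence_end_py_alt text target = pvScan suf s n := by
      simp only [find_sentence_end_py_alt, ← hcs, ← hn, ← hsdef, ← hsuf]
    have hAopen : find_sentence_end_py text target =
        (let cands : List Int :=
          (if PySem.Chars.findFrom cs ['\n', '\n'] target ≥ 0
            then [PySem.Chars.findFrom cs ['\n', '\n'] target] else []) ++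
          (pvMarkers.filter (fun m => decide (0 ≤ PySem.Chars.findFrom cs m.toList target))).map
            (fun m => PySem.Chars.findFrom cs m.toList target + 1)
         if cands = [] then (n : Int)
         else match PySem.List.min? cands (fun x => x) with
           | some m => m + 1
           | none => (n : Int)) := by
      simp only [find_sentence_end_py, PySem.Str.len_eq, PySem.Str.findFrom_eq, ← hcs, ← hn,
        if_neg hge]
      rw [pvFoldl_opt (fun m => PySem.Chars.findFrom cs m.toList target) pvMarkers]
      rfl
    haveI : DecidablePred (pvHit suf) := fun j => by
      unfold pvHit pvBlankAt pvMarkAt; infer_instance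
    by_cases hex : ∃ j, pvHit suf j
    · set j0 := Nat.find hex with hj0def
      have hj0 : pvHit suf j0 := Nat.find_spec hex
      have hmin : ∀ i < j0, ¬ pvHit suf i := fun i hi => Nat.find_min hex hi
      by_cases hbl : pvBlankAt suf j0
      · -- first hit is a blank break
        have hfb : PySem.Chars.find suf ['\n', '\n'] = (j0 : Int) :=
          pvFind_eq_of_first suf _ j0 hbl (fun i hi hp => hmin i hi (Or.inl hp))
        have hffb : PySem.Chars.findFrom cs ['\n', '\n'] target = (s : Int) + j0 := by
          rw [hFF, hfb, if_neg (by omega)]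
        rw [hAopen, hB]
        simp only [hffb]
        rw [if_pos (show ((s : Int) + j0 ≥ 0) by omega)]
        have hmem : ((s : Int) + j0) ∈
            ([(s : Int) + j0] ++ (pvMarkers.filter
              (fun m => decide (0 ≤ PySem.Chars.findFrom cs m.toList target))).map
              (fun m => PySem.Chars.findFrom cs m.toList target + 1)) := by simp
        have hbound : ∀ x ∈ ([(s : Int) + j0] ++ (pvMarkers.filter
              (fun m => decide (0 ≤ PySem.Chars.findFrom cs m.toList target))).map
              (fun m => PySem.Chars.findFrom cs m.toList target + 1)), (s : Int) + j0 ≤ x := by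
          intro x hx
          rcases List.mem_append.mp hx with hx | hx
          · simp at hx; omega
          · rcases List.mem_map.mp hx with ⟨m, hmf, rfl⟩
            rcases List.mem_filter.mp hmf with ⟨hmm, hpos⟩
            simp only [decide_eq_true_eq] at hpos
            rw [hFF] at hpos ⊢
            split_ifs at hpos ⊢ with hneg
            · omega
            · have hge0 : (0 : Int) ≤ PySem.Chars.find suf m.toList := by
                have := PySem.Chars.neg_one_le_find suf m.toList; omega
              have := pvFind_ge suf m.toList j0 hge0
                (fun i hi hp => hmin i hi (Or.inr ⟨m, hmm, hp⟩))
              omega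
        rw [if_neg (by intro h; rw [h] at hmem; simp at hmem)]
        rw [pvMin?_eq _ _ hmem hbound]
        rw [pvScan_blank suf s n j0 hbl hmin]
      · -- first hit is a marker
        have hmk : pvMarkAt suf j0 := hj0.resolve_left hbl
        obtain ⟨m0, hm0, hp0⟩ := hmk
        have hf0 : PySem.Chars.find suf m0.toList = (j0 : Int) :=
          pvFind_eq_of_first suf _ j0 hp0 (fun i hi hp => hmin i hi (Or.inr ⟨m0, hm0, hp⟩))
        have hff0 : PySem.Chars.findFrom cs m0.toList target = (s : Int) + j0 := by
          rw [hFF, hf0, if_neg (by omega)]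
        rw [hAopen, hB]
        have hmem : ((s : Int) + j0 + 1) ∈
            ((if PySem.Chars.findFrom cs ['\n', '\n'] target ≥ 0
              then [PySem.Chars.findFrom cs ['\n', '\n'] target] else []) ++
             (pvMarkers.filter
              (fun m => decide (0 ≤ PySem.Chars.findFrom cs m.toList target))).map
              (fun m => PySem.Chars.findFrom cs m.toList target + 1)) := by
          refine List.mem_append.mpr (Or.inr ?_)
          refine List.mem_map.mpr ⟨m0, List.mem_filter.mpr ⟨hm0, by simp only [decide_eq_true_eq]; rw [hff0]; omega⟩, ?_⟩
          rw [hff0]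
        have hbound : ∀ x ∈ ((if PySem.Chars.findFrom cs ['\n', '\n'] target ≥ 0
              then [PySem.Chars.findFrom cs ['\n', '\n'] target] else []) ++
             (pvMarkers.filter
              (fun m => decide (0 ≤ PySem.Chars.findFrom cs m.toList target))).map
              (fun m => PySem.Chars.findFrom cs m.toList target + 1)),
            (s : Int) + j0 + 1 ≤ x := by
          intro x hx
          rcases List.mem_append.mp hx with hx | hx
          · -- blank candidate: its find is ≥ j0 and ≠ j0
            split_ifs at hx with hpos
            · simp only [List.mem_singleton] at hx
              subst hx
              rw [hFF] at hpos ⊢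
              split_ifs at hpos ⊢ with hneg
              · omega
              · have hge0 : (0 : Int) ≤ PySem.Chars.find suf ['\n', '\n'] := by
                  have := PySem.Chars.neg_one_le_find suf ['\n', '\n']; omega
                have hge1 := pvFind_ge suf ['\n', '\n'] j0 hge0
                  (fun i hi hp => hmin i hi (Or.inl hp))
                have hne : PySem.Chars.find suf ['\n', '\n'] ≠ (j0 : Int) := by
                  intro heq
                  obtain ⟨hpf, _⟩ := PySem.Chars.find_spec hge0
                  rw [heq] at hpf
                  simp only [Int.toNat_natCast] at hpf
                  exact hbl hpf
                omega
            · simp at hx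
          · rcases List.mem_map.mp hx with ⟨m, hmf, rfl⟩
            rcases List.mem_filter.mp hmf with ⟨hmm, hpos⟩
            simp only [decide_eq_true_eq] at hpos
            rw [hFF] at hpos ⊢
            split_ifs at hpos ⊢ with hneg
            · omega
            · have hge0 : (0 : Int) ≤ PySem.Chars.find suf m.toList := by
                have := PySem.Chars.neg_one_le_find suf m.toList; omega
              have := pvFind_ge suf m.toList j0 hge0
                (fun i hi hp => hmin i hi (Or.inr ⟨m, hmm, hp⟩))
              omega
        rw [if_neg (by intro h; rw [h] at hmem; simp at hmem)]
        rw [pvMin?_eq _ _ hmem hbound]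
        rw [pvScan_mark suf s n j0 ⟨m0, hm0, hp0⟩ hbl hmin]
        push_cast; ring
    · -- no pattern occurs after the start position
      push_neg at hex
      have hnone : ∀ sub : List Char,
          (∀ j, sub <+: suf.drop j → pvHit suf j) → PySem.Chars.find suf sub = -1 := by
        intro sub hh
        rw [PySem.Chars.find_eq_neg_one_iff]
        intro hinf
        obtain ⟨j, hj⟩ := (PySem.Chars.exists_prefix_drop_iff_isIn sub suf).mpr
          ((PySem.Chars.isIn_iff_infix sub suf).mpr hinf)
        exact hex j (hh j hj)
      have hfb : PySem.Chars.findFrom cs ['\n', '\n'] target = -1 := by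
        rw [hFF, hnone ['\n', '\n'] (fun j hj => Or.inl hj)]
        simp
      have hfm : ∀ m ∈ pvMarkers, PySem.Chars.findFrom cs m.toList target = -1 := by
        intro m hmm
        rw [hFF, hnone m.toList (fun j hj => Or.inr ⟨m, hmm, hj⟩)]
        simp
      rw [hAopen, hB]
      have hfilter : pvMarkers.filter
          (fun m => decide (0 ≤ PySem.Chars.findFrom cs m.toList target)) = [] := by
        rw [List.filter_eq_nil_iff]
        intro m hmm
        simp [hfm m hmm]
      simp only [hfb, hfilter, List.map_nil, List.append_nil]
      norm_num
      exact (pvScan_none suf s n hex).symm
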